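-- pv_equiv track=rewrite | github.com/z-gong/mstk | mstk/forcefield/dff_utils.py | _dff_fuzzy_score
-- ===== SOURCE A (Python) =====
-- def _dff_fuzzy_score(name1, name2, max_score, min_length):
--     len1, len2 = len(name1), len(name2)
--     if len1 < min_length or len2 < min_length:
--         return 0
--     if name1 == name2:
--         return max_score
--     elif len1 == len2:
--         return _dff_fuzzy_score(name1[:-1], name2[:-1], max_score - 2, min_length)
--     elif len1 > len2:
--         return _dff_fuzzy_score(name1[:len2], name2, max_score - (len1 - len2), min_length)
--     else:
--         return _dff_fuzzy_score(name1, name2[:len1], max_score - (len2 - len1), min_length)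
-- ===== SOURCE B (Python) =====
-- def _dff_fuzzy_score(name1, name2, max_score, min_length):
--     len1, len2 = len(name1), len(name2)
--     if len1 < min_length or len2 < min_length:
--         return 0
--     m = min(len1, len2)
--     c = 0
--     while c < m and name1[c] == name2[c]:
--         c += 1
--     if c < min_length:
--         return 0
--     return max_score - abs(len1 - len2) - 2 * (m - c)
-- ===== Notes on version B (the rewrite author's own statement) =====
-- stated objective: faster
-- what changed: Replaces the recursive truncate-and-retry descent (which rebuilds string slices at every step) with a single left-to-right common-prefix scan and a closed-form score: max_score - |len1-len2| - 2*(min_len - common_prefix), with 0 when a length or the common prefix falls below min_length.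
import Mathlib
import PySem

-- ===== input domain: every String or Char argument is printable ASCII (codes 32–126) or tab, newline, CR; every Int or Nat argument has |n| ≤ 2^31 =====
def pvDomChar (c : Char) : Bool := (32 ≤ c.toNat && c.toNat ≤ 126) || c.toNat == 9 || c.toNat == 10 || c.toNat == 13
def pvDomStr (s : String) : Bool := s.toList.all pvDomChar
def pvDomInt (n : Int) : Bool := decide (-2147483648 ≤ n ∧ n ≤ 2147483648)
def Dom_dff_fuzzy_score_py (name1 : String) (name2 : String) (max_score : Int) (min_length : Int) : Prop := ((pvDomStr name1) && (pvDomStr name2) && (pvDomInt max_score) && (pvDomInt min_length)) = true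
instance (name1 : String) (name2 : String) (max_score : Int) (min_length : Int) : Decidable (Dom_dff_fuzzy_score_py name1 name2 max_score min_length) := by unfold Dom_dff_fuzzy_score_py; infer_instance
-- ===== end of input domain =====

-- B replaces A's recursive truncate-and-retry descent by one common-prefix scan plus a
-- closed-form score formula (objective: faster, O(L) instead of O(L^2)).

-- ===== PORT A =====
-- literal transliteration of A's recursion; slices via PySem.List.slice
def pvDffA (l1 l2 : List Char) (max_score min_length : Int) : Int :=
  -- len1, len2 of the Python are written inline as (l1.length : Int), (l2.length : Int)
  if (l1.length : Int) < min_length ∨ (l2.length : Int) < min_length then 0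
  else if l1 = l2 then max_score
  else if (l1.length : Int) = (l2.length : Int) then
    pvDffA (PySem.List.slice l1 none (some (-1))) (PySem.List.slice l2 none (some (-1)))
      (max_score - 2) min_length
  else if (l1.length : Int) > (l2.length : Int) then
    pvDffA (PySem.List.slice l1 none (some (l2.length : Int))) l2 (max_score - ((l1.length : Int) - (l2.length : Int))) min_length
  else
    pvDffA l1 (PySem.List.slice l2 none (some (l1.length : Int))) (max_score - ((l2.length : Int) - (l1.length : Int))) min_length
termination_by l1.length + l2.length
decreasing_by
  · simp only [PySem.List.slice_to_neg_one, List.length_dropLast]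
    have h1 : l1.length ≠ 0 := by
      intro h0
      exact ‹¬ l1 = l2› (by
        have : l2.length = 0 := by omega
        simp_all [List.length_eq_zero_iff])
    omega
  · rw [show ((l2.length : Int)) = ((l2.length : Nat) : Int) by simp,
      PySem.List.slice_to_natCast]
    simp only [List.length_take]
    omega
  · rw [show ((l1.length : Int)) = ((l1.length : Nat) : Int) by simp,
      PySem.List.slice_to_natCast]
    simp only [List.length_take]
    omega

def dff_fuzzy_score_py (name1 : String) (name2 : String) (max_score : Int) (min_length : Int) : Int :=
  pvDffA name1.toList name2.toList max_score min_length

-- ===== PORT B =====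
-- common-prefix length: B's while-loop 'c += 1 while chars agree'
def pvCp : List Char → List Char → Nat
  | a :: x, b :: y => if a = b then pvCp x y + 1 else 0
  | _, _ => 0

def pvDffB (l1 l2 : List Char) (max_score min_length : Int) : Int :=
  if (l1.length : Int) < min_length ∨ (l2.length : Int) < min_length then 0
  else
    if (pvCp l1 l2 : Int) < min_length then 0
    else max_score - |(l1.length : Int) - (l2.length : Int)| -
      2 * (min (l1.length : Int) (l2.length : Int) - (pvCp l1 l2 : Int))

def dff_fuzzy_score_py_alt (name1 : String) (name2 : String) (max_score : Int) (min_length : Int) : Int :=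
  pvDffB name1.toList name2.toList max_score min_length

-- ===== PRECONDITION & SPEC =====
def Spec_dff_fuzzy_score_py (name1 : String) (name2 : String) (max_score : Int) (min_length : Int) (out : Int) : Prop := out = dff_fuzzy_score_py_alt name1 name2 max_score min_length
instance (name1 : String) (name2 : String) (max_score : Int) (min_length : Int) (out : Int) : Decidable (Spec_dff_fuzzy_score_py name1 name2 max_score min_length out) := by unfold Spec_dff_fuzzy_score_py; infer_instance

-- ===== CLAIM (what is proved, stated in full; the proofs are below) =====
def Claim_equal_dff_fuzzy_score_py : Prop := ∀ (name1 : String) (name2 : String) (max_score : Int) (min_length : Int), Dom_dff_fuzzy_score_py name1 name2 max_score min_length → Spec_dff_fuzzy_score_py name1 name2 max_score min_length (dff_fuzzy_score_py name1 name2 max_score min_length)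

-- ===== LEMMAS AND PROOFS =====

theorem pvCp_le_left (x y : List Char) : pvCp x y ≤ x.length := by
  induction x generalizing y with
  | nil => simp [pvCp]
  | cons a x ih =>
    cases y with
    | nil => simp [pvCp]
    | cons b y =>
      simp only [pvCp, List.length_cons]
      split_ifs
      · have := ih y; omega
      · omega

theorem pvCp_le_right (x y : List Char) : pvCp x y ≤ y.length := by
  induction x generalizing y with
  | nil => simp [pvCp]
  | cons a x ih =>
    cases y with
    | nil => simp [pvCp]
    | cons b y =>
      simp only [pvCp, List.length_cons]
      split_ifs
      · have := ih y; omega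
      · omega

theorem pvCp_self (x : List Char) : pvCp x x = x.length := by
  induction x with
  | nil => rfl
  | cons a x ih => simp [pvCp, ih]

theorem pvCp_eq_length_iff (x y : List Char) (h : x.length = y.length) :
    pvCp x y = x.length ↔ x = y := by
  induction x generalizing y with
  | nil =>
    cases y with
    | nil => simp [pvCp]
    | cons b y => simp at h
  | cons a x ih =>
    cases y with
    | nil => simp at h
    | cons b y =>
      simp only [List.length_cons] at h
      simp only [pvCp, List.length_cons, List.cons.injEq]
      split_ifs with hab
      · rw [Nat.add_left_inj, ih y (by omega)]
        simp [hab]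
      · constructor
        · intro hc; exact hc.elim
        · rintro ⟨h1, _⟩; exact absurd h1 hab

theorem pvCp_nil_right (x : List Char) : pvCp x [] = 0 := by
  cases x <;> rfl

theorem pvCp_take_left (x y : List Char) (k : Nat) :
    pvCp (x.take k) y = min (pvCp x y) k := by
  induction x generalizing y k with
  | nil => simp [pvCp]
  | cons a x ih =>
    cases k with
    | zero => simp [pvCp]
    | succ k =>
      cases y with
      | nil => simp [pvCp_nil_right]
      | cons b y =>
        simp only [List.take_succ_cons, pvCp]
        split_ifs
        · rw [ih y k]; omega
        · simp

theorem pvCp_take_right (x y : List Char) (k : Nat) :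
    pvCp x (y.take k) = min (pvCp x y) k := by
  induction x generalizing y k with
  | nil => simp [pvCp]
  | cons a x ih =>
    cases k with
    | zero => simp [pvCp_nil_right]
    | succ k =>
      cases y with
      | nil => simp [pvCp_nil_right]
      | cons b y =>
        simp only [List.take_succ_cons, pvCp]
        split_ifs
        · rw [ih y k]; omega
        · simp

-- main equivalence on lists, following pvDffA's recursion
theorem pvDffA_eq_pvDffB (l1 l2 : List Char) (ms ml : Int) :
    pvDffA l1 l2 ms ml = pvDffB l1 l2 ms ml := by
  fun_induction pvDffA l1 l2 ms ml with
  | case1 l1 l2 ms hlt =>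
    -- some length below min_length: both 0
    rw [pvDffB, if_pos hlt]
  | case2 l2 ms hlt =>
    -- equal strings
    rw [pvDffB, if_neg hlt, pvCp_self]
    push_neg at hlt
    rw [if_neg (not_lt.2 hlt.1)]
    simp
  | case3 l1 l2 ms hlt hne hlen ih =>
    -- equal lengths, different strings: drop last char on both
    rw [pvDffB]
    simp only [PySem.List.slice_to_neg_one]
    rw [PySem.List.slice_to_neg_one, PySem.List.slice_to_neg_one] at ih
    rw [pvDffB] at ih
    push_neg at hlt
    have hn1 : l1.length = l2.length := by exact_mod_cast hlen
    have hcplt : pvCp l1 l2 < l1.length := by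
      have hle := pvCp_le_left l1 l2
      rcases Nat.lt_or_ge (pvCp l1 l2) l1.length with h | h
      · exact h
      · exact absurd ((pvCp_eq_length_iff l1 l2 hn1).1 (le_antisymm hle h)) hne
    have hcp' : pvCp l1.dropLast l2.dropLast = pvCp l1 l2 := by
      rw [List.dropLast_eq_take, List.dropLast_eq_take, hn1, pvCp_take_left, pvCp_take_right]
      omega
    simp only [List.length_dropLast, hcp', hn1] at ih
    have hml2 : ml ≤ (l2.length : Int) := hlt.2
    have hpos : 0 < l2.length := by
      rcases Nat.eq_zero_or_pos l2.length with h | h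
      · exact absurd (by
          rw [List.length_eq_zero_iff.1 h, List.length_eq_zero_iff.1 (by omega : l1.length = 0)]) hne
      · exact h
    rw [Nat.cast_sub hpos] at ih
    rw [ih]
    simp only [hn1]
    by_cases hsplit : ((l2.length : Int)) - 1 < ml
    · rw [if_pos (by push_cast; omega)]
      have hclt : (pvCp l1 l2 : Int) < ml := by
        have : (pvCp l1 l2 : Int) < (l1.length : Int) := by exact_mod_cast hcplt
        omega
      rw [if_neg (by push_neg; exact ⟨hml2, hml2⟩), if_pos hclt]
    · rw [if_neg (by push_cast; omega)]
      by_cases hc : ((pvCp l1 l2 : Int)) < ml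
      · rw [if_pos hc, if_neg (by push_neg; exact ⟨hml2, hml2⟩), if_pos hc]
      · rw [if_neg hc, if_neg (by push_neg; exact ⟨hml2, hml2⟩), if_neg hc]
        have hcle : (pvCp l1 l2 : Int) ≤ (l2.length : Int) - 1 := by
          have : (pvCp l1 l2 : Int) < (l1.length : Int) := by exact_mod_cast hcplt
          omega
        push_cast
        rw [abs_of_nonpos (by omega), abs_of_nonpos (by omega), min_self, min_self]
        ring
  | case4 l1 l2 ms hlt hne hlen hgt ih =>
    -- len1 > len2: truncate l1 to len2
    rw [pvDffB]
    push_neg at hlt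
    have hlen12 : l2.length < l1.length := by exact_mod_cast hgt
    rw [PySem.List.slice_to_natCast] at ih
    rw [PySem.List.slice_to_natCast]
    rw [pvDffB] at ih
    have htk : (l1.take l2.length).length = l2.length := by
      simp [List.length_take]; omega
    have hcple : pvCp l1 l2 ≤ l2.length := pvCp_le_right l1 l2
    have hcp2 : pvCp (l1.take l2.length) l2 = pvCp l1 l2 := by
      rw [pvCp_take_left]
      omega
    simp only [htk, hcp2] at ih
    rw [ih]
    have hml2 : ml ≤ (l2.length : Int) := hlt.2
    rw [if_neg (show ¬(((l2.length : Int)) < ml ∨ ((l2.length : Int)) < ml) by push_neg; exact ⟨hml2, hml2⟩),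
      if_neg (show ¬(((l1.length : Int)) < ml ∨ ((l2.length : Int)) < ml) by push_neg; exact hlt)]
    by_cases hc : ((pvCp l1 l2 : Int)) < ml
    · rw [if_pos hc, if_pos hc]
    · rw [if_neg hc, if_neg hc]
      rw [abs_of_nonpos (by omega), abs_of_nonneg (by omega), min_self]
      rw [min_eq_right (by exact_mod_cast le_of_lt hlen12 : (l2.length : Int) ≤ (l1.length : Int))]
      ring
  | case5 l1 l2 ms hlt hne hlen hngt ih =>
    -- len2 > len1: truncate l2 to len1
    rw [pvDffB]
    push_neg at hlt
    have hlen12 : l1.length < l2.length := by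
      have h3 : (l1.length : Int) < (l2.length : Int) := by
        rcases lt_or_ge ((l1.length : Int)) ((l2.length : Int)) with h | h
        · exact h
        · rcases eq_or_lt_of_le h with h | h
          · exact absurd h.symm hlen
          · exact absurd h hngt
      exact_mod_cast h3
    rw [PySem.List.slice_to_natCast] at ih
    rw [PySem.List.slice_to_natCast]
    rw [pvDffB] at ih
    have htk : (l2.take l1.length).length = l1.length := by
      simp [List.length_take]; omega
    have hcple : pvCp l1 l2 ≤ l1.length := pvCp_le_left l1 l2
    have hcp2 : pvCp l1 (l2.take l1.length) = pvCp l1 l2 := by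
      rw [pvCp_take_right]
      omega
    simp only [htk, hcp2] at ih
    rw [ih]
    have hml1 : ml ≤ (l1.length : Int) := hlt.1
    rw [if_neg (show ¬(((l1.length : Int)) < ml ∨ ((l1.length : Int)) < ml) by push_neg; exact ⟨hml1, hml1⟩),
      if_neg (show ¬(((l1.length : Int)) < ml ∨ ((l2.length : Int)) < ml) by push_neg; exact hlt)]
    by_cases hc : ((pvCp l1 l2 : Int)) < ml
    · rw [if_pos hc, if_pos hc]
    · rw [if_neg hc, if_neg hc]
      rw [abs_of_nonpos (by omega), abs_of_nonpos (by omega), min_self]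
      rw [min_eq_left (by exact_mod_cast le_of_lt hlen12 : (l1.length : Int) ≤ (l2.length : Int))]
      ring

-- ===== VERDICT (by name: the statement is the Claim_ definition above) =====
theorem dff_fuzzy_score_py_spec : Claim_equal_dff_fuzzy_score_py := by
  intro n1 n2 ms ml _
  unfold Spec_dff_fuzzy_score_py dff_fuzzy_score_py dff_fuzzy_score_py_alt
  exact pvDffA_eq_pvDffB n1.toList n2.toList ms ml
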